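-- pv_equiv track=rewrite | github.com/begenFys/python_urfu_course | hw/stat/homestat.py | extract_general
-- ===== SOURCE A (Python) =====
-- Stat = dict[str, list[dict[str, str]]]
--
-- def extract_general(stat: Stat, year_view: bool = False):
--     """
--     Функция принимает на вход вычисленную статистику и выдаёт список tuple'ов
--     (имя, количество) общей статистики для всех имён.
--     Список должен быть отсортирован по убыванию количества.
--     """
--     names_stat: dict[str, int] = {}
--     year_stat: dict[str, list[tuple]] = {}
--
--     def mini_stat_to_list(mini_stat: dict[str, int]):
--         return sorted(mini_stat.items(), key=lambda x: x[1], reverse=True)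
--
--     for year_value in stat:
--         year: list[dict[str, str]] = stat[year_value]
--         year_names_stat: dict[str, int] = {}
--         for full_name in year:
--             if full_name["name"] not in names_stat:
--                 names_stat[full_name["name"]] = 0
--             if full_name["name"] not in year_names_stat:
--                 year_names_stat[full_name["name"]] = 0
--
--             names_stat[full_name["name"]] += 1
--             year_names_stat[full_name["name"]] += 1
--
--         year_stat[year_value] = mini_stat_to_list(year_names_stat)
--
--     if not year_view:
--         return mini_stat_to_list(names_stat)
--     else:
--         return year_stat
-- ===== SOURCE B (Python) =====
-- def extract_general(stat, year_view=False):
--     # B: count each year independently, then (for the overall view) merge the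
--     # per-year counters in year order instead of maintaining a parallel
--     # global accumulator inside the counting loop.
--     def counts(people):
--         c = {}
--         for p in people:
--             n = p["name"]
--             c[n] = c.get(n, 0) + 1
--         return c
--
--     def desc(c):
--         return sorted(c.items(), key=lambda x: x[1], reverse=True)
--
--     year_counts = [(y, counts(people)) for y, people in stat.items()]
--     if year_view:
--         return {y: desc(c) for y, c in year_counts}
--     total = {}
--     for _, c in year_counts:
--         for n, k in c.items():
--             total[n] = total.get(n, 0) + k
--     return desc(total)
-- ===== Notes on version B (the rewrite author's own statement) =====
-- stated objective: alternative
-- what changed: A counts the overall totals in a second accumulator fused into the per-year counting loop; B counts each year independently and, for the overall view, derives the totals afterwards by merging the per-year counters in year order, then sorts.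
import Mathlib
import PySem

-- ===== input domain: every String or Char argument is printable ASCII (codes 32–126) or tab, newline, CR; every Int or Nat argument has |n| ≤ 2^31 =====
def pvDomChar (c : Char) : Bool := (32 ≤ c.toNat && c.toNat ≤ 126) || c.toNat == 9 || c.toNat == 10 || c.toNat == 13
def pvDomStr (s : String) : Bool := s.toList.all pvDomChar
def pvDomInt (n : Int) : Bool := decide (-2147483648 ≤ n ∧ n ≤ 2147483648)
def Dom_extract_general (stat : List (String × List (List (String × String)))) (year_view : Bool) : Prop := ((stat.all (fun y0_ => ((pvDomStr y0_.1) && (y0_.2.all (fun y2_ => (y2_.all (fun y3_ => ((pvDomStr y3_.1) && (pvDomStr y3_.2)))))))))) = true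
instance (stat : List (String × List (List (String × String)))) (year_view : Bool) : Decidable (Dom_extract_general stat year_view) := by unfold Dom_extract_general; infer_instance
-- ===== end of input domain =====

-- B computes the overall totals by merging independently-built per-year counters instead of
-- A's second global accumulator fused into the counting loop (alternative decomposition, same cost).


-- ===== PORT A =====
-- full_name["name"]; exact under Pre_ (every person dict carries the key "name"; Python raises KeyError otherwise)
def pvName (p : List (String × String)) : String := (PySem.Dict.mk p).getD "name" ""

-- helper mini_stat_to_list: sorted(mini_stat.items(), key=lambda x: x[1], reverse=True)
def miniStatToList (d : PySem.Dict String Int) : List (String × Int) :=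
  PySem.List.sorted d.items (fun x => x.2) true

-- body of A's inner loop over a year's names: setdefault-to-0 then += 1, on BOTH accumulators
def aInnerStep (acc2 : PySem.Dict String Int × PySem.Dict String Int)
    (full_name : List (String × String)) : PySem.Dict String Int × PySem.Dict String Int :=
  let n := pvName full_name
  let ns := if acc2.1.contains n then acc2.1 else acc2.1.insert n 0
  let ys := if acc2.2.contains n then acc2.2 else acc2.2.insert n 0
  (ns.insert n (ns.getD n 0 + 1), ys.insert n (ys.getD n 0 + 1))

-- body of A's outer loop over years (state = (names_stat, year_stat)); year = stat[year_value]
def aOuterStep (st : PySem.Dict String (List (List (String × String))))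
    (acc : PySem.Dict String Int × PySem.Dict String (List (String × Int)))
    (kv : String × List (List (String × String))) :
    PySem.Dict String Int × PySem.Dict String (List (String × Int)) :=
  let year := st.getD kv.1 []   -- stat[year_value]: the iterated key is present; first match under Pre_'s nodup keys
  let inner := year.foldl aInnerStep (acc.1, PySem.Dict.empty)
  (inner.1, acc.2.insert kv.1 (miniStatToList inner.2))

def extract_general (stat : List (String × List (List (String × String)))) (year_view : Bool) : List (String × Int) :=
  let st : PySem.Dict String (List (List (String × String))) := PySem.Dict.mk stat
  let res := stat.foldl (aOuterStep st) (PySem.Dict.empty, PySem.Dict.empty)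
  if year_view = false then miniStatToList res.1
  else []   -- Python returns year_stat here, a dict of lists (not of the declared return type); excluded by Pre_

-- ===== PORT B =====
-- counts(people): one fresh counter per year
def egCounts (people : List (List (String × String))) : PySem.Dict String Int :=
  people.foldl (fun c p => c.insert (pvName p) (c.getD (pvName p) 0 + 1)) PySem.Dict.empty

-- desc(c)
def egDesc (c : PySem.Dict String Int) : List (String × Int) :=
  PySem.List.sorted c.items (fun x => x.2) true

-- total[n] = total.get(n, 0) + k
def bMergeStep (t : PySem.Dict String Int) (nk : String × Int) : PySem.Dict String Int :=
  t.insert nk.1 (t.getD nk.1 0 + nk.2)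

def extract_general_alt (stat : List (String × List (List (String × String)))) (year_view : Bool) : List (String × Int) :=
  let year_counts := stat.map (fun yp => (yp.1, egCounts yp.2))
  if year_view then []   -- Python returns {y: desc(c)}, a dict of lists (not of the declared return type); excluded by Pre_
  else
    let total := year_counts.foldl (fun t yc => yc.2.items.foldl bMergeStep t) PySem.Dict.empty
    egDesc total

-- ===== PRECONDITION & SPEC =====
-- Pre_ excludes year_view = true, where A returns a per-year dict of lists — not a value of the declared
-- List (String × Int) return type; it also excludes association lists with duplicate year keys (they represent
-- no Python dict) and persons lacking the "name" key (there A raises KeyError).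
def Pre_extract_general (stat : List (String × List (List (String × String)))) (year_view : Bool) : Prop :=
  year_view = false ∧ (stat.map Prod.fst).Nodup ∧
    ∀ yp ∈ stat, ∀ p ∈ yp.2, (PySem.Dict.mk p).contains "name" = true
instance (stat : List (String × List (List (String × String)))) (year_view : Bool) : Decidable (Pre_extract_general stat year_view) := by unfold Pre_extract_general; infer_instance

def pvWitness_extract_general : (List (String × List (List (String × String)))) × Bool :=
  ([("2020", [[("name", "a")], [("name", "b")], [("name", "a")]]), ("2021", [[("name", "b")]])], false)

def Spec_extract_general (stat : List (String × List (List (String × String)))) (year_view : Bool) (out : List (String × Int)) : Prop := out = extract_general_alt stat year_view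
instance (stat : List (String × List (List (String × String)))) (year_view : Bool) (out : List (String × Int)) : Decidable (Spec_extract_general stat year_view out) := by unfold Spec_extract_general; infer_instance

-- ===== CLAIM (what is proved, stated in full; the proofs are below) =====
def Claim_equal_extract_general : Prop := ∀ (stat : List (String × List (List (String × String)))) (year_view : Bool), Dom_extract_general stat year_view → Pre_extract_general stat year_view → Spec_extract_general stat year_view (extract_general stat year_view)

-- ===== LEMMAS AND PROOFS =====

-- the single-name counting step both proofs reduce to
def cStep (c : PySem.Dict String Int) (n : String) : PySem.Dict String Int :=
  c.insert n (c.getD n 0 + 1)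

-- A's setdefault-then-increment on one name collapses to a single counting insert.
theorem eg_step_collapse (c : PySem.Dict String Int) (n : String) :
    (let ns := if c.contains n then c else c.insert n 0
     ns.insert n (ns.getD n 0 + 1)) = cStep c n := by
  by_cases h : c.contains n = true
  · simp [cStep, h]
  · simp only [Bool.not_eq_true] at h
    simp [cStep, h, PySem.Dict.getD_insert_self, PySem.Dict.insert_insert_self,
      PySem.Dict.getD_of_not_contains _ _ h]

-- first component of A's inner (per-year) loop: the global counter just counts the names
theorem eg_inner_fst (year : List (List (String × String)))
    (d e : PySem.Dict String Int) :
    (year.foldl aInnerStep (d, e)).1 = (year.map pvName).foldl cStep d := by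
  induction year generalizing d e with
  | nil => rfl
  | cons p t ih =>
      simp only [List.foldl_cons, List.map_cons, aInnerStep]
      rw [ih, eg_step_collapse]

-- nodup keys ⇒ looking up an iterated key returns its own value
theorem eg_lookup (stat : List (String × List (List (String × String))))
    (h : (stat.map Prod.fst).Nodup) (kv : String × List (List (String × String)))
    (hm : kv ∈ stat) : (PySem.Dict.mk stat).getD kv.1 [] = kv.2 := by
  exact PySem.Dict.getD_of_mem_items _ hm (by simpa [PySem.Dict.keys_mk] using h) []

-- first component of A's outer loop
theorem eg_outer_fst (st : PySem.Dict String (List (List (String × String))))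
    (stat0 : List (String × List (List (String × String))))
    (hlk : ∀ kv ∈ stat0, st.getD kv.1 [] = kv.2)
    (d : PySem.Dict String Int) (e : PySem.Dict String (List (String × Int))) :
    (stat0.foldl (aOuterStep st) (d, e)).1
      = stat0.foldl (fun c kv => (kv.2.map pvName).foldl cStep c) d := by
  induction stat0 generalizing d e with
  | nil => rfl
  | cons kv t ih =>
      simp only [List.foldl_cons, aOuterStep]
      rw [ih (fun x hx => hlk x (List.mem_cons_of_mem _ hx)), eg_inner_fst,
        hlk kv List.mem_cons_self]

-- filtering a nodup-keyed tabulation at one key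
theorem eg_filter_tab (v : String) (s : List String) (hs : s.Nodup) (f : String → Int) :
    (s.map (fun k => (k, f k))).filter (fun nk => nk.1 == v)
      = if v ∈ s then [(v, f v)] else [] := by
  induction s with
  | nil => simp
  | cons a t ih =>
      simp only [List.nodup_cons] at hs
      by_cases hav : a = v
      · subst hav
        simp [ih hs.2, hs.1]
      · simp [Ne.symm hav, hav, ih hs.2]

-- value of B's merge loop at any key
theorem eg_merge_getD (l : List (String × Int)) (d : PySem.Dict String Int) (v : String) :
    (l.foldl bMergeStep d).getD v 0
      = d.getD v 0 + ((l.filter (fun nk => nk.1 == v)).map (·.2)).sum := by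
  induction l generalizing d with
  | nil => simp
  | cons nk t ih =>
      simp only [List.foldl_cons, List.filter_cons, bMergeStep, ih]
      by_cases h : nk.1 = v
      · simp [h, add_assoc]
      · simp [h, Ne.symm h, PySem.Dict.getD_insert]

theorem eg_update_ofList (s : PySem.Set String) (xs : List String) :
    PySem.Set.update s (PySem.Set.ofList xs) = PySem.Set.update s xs := by
  rw [PySem.Set.update_eq_append_filter, PySem.Set.update_eq_append_filter,
    PySem.Set.ofList_ofList]

-- merging Counter(xs) into d = counting xs into d
theorem eg_merge_counter (xs : List String) (d : PySem.Dict String Int)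
    (hd : d.keys.Nodup) :
    (PySem.Dict.counter xs).items.foldl bMergeStep d = xs.foldl cStep d := by
  have hndL : ((PySem.Dict.counter xs).items.foldl bMergeStep d).keys.Nodup := by
    simpa [bMergeStep] using
      PySem.Dict.nodup_keys_foldl_insert_key (PySem.Dict.counter xs).items Prod.fst
        (fun t nk => t.getD nk.1 0 + nk.2) d hd
  have hndR : (xs.foldl cStep d).keys.Nodup := by
    simpa [cStep] using
      PySem.Dict.nodup_keys_foldl_insert xs (fun t x => t.getD x 0 + 1) d hd
  have hkeys : ((PySem.Dict.counter xs).items.foldl bMergeStep d).keys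
      = (xs.foldl cStep d).keys := by
    have hL := PySem.Dict.keys_foldl_insert_key (PySem.Dict.counter xs).items Prod.fst
        (fun t nk => t.getD nk.1 0 + nk.2) d
    have hR := PySem.Dict.keys_foldl_insert xs (fun t x => t.getD x 0 + 1) d
    show (List.foldl (fun (t : PySem.Dict String Int) (nk : String × Int) => t.insert nk.1 (t.getD nk.1 0 + nk.2)) d (PySem.Dict.counter xs).items).keys
      = (List.foldl (fun (t : PySem.Dict String Int) (x : String) => t.insert x (t.getD x 0 + 1)) d xs).keys
    rw [hL, hR]
    have : (PySem.Dict.counter xs).items.map Prod.fst = PySem.Set.ofList xs := by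
      simpa [PySem.Dict.keys] using PySem.Dict.keys_counter xs
    rw [this, eg_update_ofList]
  have hgetD : ∀ v, ((PySem.Dict.counter xs).items.foldl bMergeStep d).getD v 0
      = (xs.foldl cStep d).getD v 0 := by
    intro v
    rw [eg_merge_getD, PySem.Dict.items_counter,
      eg_filter_tab v _ (PySem.Set.nodup_ofList xs)]
    have hR : (xs.foldl cStep d).getD v 0 = d.getD v 0 + xs.count v := by
      simpa [cStep] using PySem.Dict.getD_foldl_insert_add_one xs d v
    rw [hR]
    by_cases hv : v ∈ xs
    · simp [PySem.Set.mem_ofList, hv]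
    · simp [PySem.Set.mem_ofList, hv, List.count_eq_zero_of_not_mem hv]
  apply PySem.Dict.ext
  rw [PySem.Dict.items_eq_map_keys _ hndL 0, PySem.Dict.items_eq_map_keys _ hndR 0, hkeys]
  exact List.map_congr_left (fun k _ => by rw [hgetD k])

-- B's whole merge pass = A's fused global count
theorem eg_total_eq (stat0 : List (String × List (List (String × String))))
    (d : PySem.Dict String Int) (hd : d.keys.Nodup) :
    stat0.foldl (fun t yp => (egCounts yp.2).items.foldl bMergeStep t) d
      = stat0.foldl (fun c kv => (kv.2.map pvName).foldl cStep c) d := by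
  induction stat0 generalizing d with
  | nil => rfl
  | cons kv t ih =>
      simp only [List.foldl_cons]
      have hcnt : egCounts kv.2 = PySem.Dict.counter (kv.2.map pvName) := by
        unfold egCounts
        rw [← List.foldl_map (f := pvName)
          (g := fun (c : PySem.Dict String Int) n => c.insert n (c.getD n 0 + 1)),
          PySem.Dict.foldl_insert_getD_add_one_eq_counter]
      rw [hcnt, eg_merge_counter _ _ hd]
      have : ((kv.2.map pvName).foldl cStep d).keys.Nodup := by
        simpa [cStep] using
          PySem.Dict.nodup_keys_foldl_insert (kv.2.map pvName) (fun t x => t.getD x 0 + 1) d hd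
      exact ih _ this

-- ===== VERDICT (by name: the statement is the Claim_ definition above) =====
theorem extract_general_spec : Claim_equal_extract_general := by
  intro stat year_view _hdom hpre
  obtain ⟨hyv, hnd, _hnames⟩ := hpre
  subst hyv
  show extract_general stat false = extract_general_alt stat false
  unfold extract_general extract_general_alt
  simp only [Bool.false_eq_true, if_false, egDesc, miniStatToList]
  rw [eg_outer_fst _ _ (fun kv hkv => eg_lookup stat hnd kv hkv)]
  rw [List.foldl_map (f := fun yp : String × List (List (String × String)) => (yp.1, egCounts yp.2))
    (g := fun t yc : _ => yc.2.items.foldl bMergeStep t)]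
  rw [eg_total_eq _ _ (by simp [PySem.Dict.keys_empty])]
  rw [if_pos trivial]
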